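-- pv_equiv track=rewrite | github.com/peopleworks/BannerSemanticSearch | scripts/convert_darkmode.py | prefix_selector_list
-- ===== SOURCE A (Python) =====
-- def prefix_selector_list(sel_str, prefix):
--     """Split a selector list by commas (at top level only) and prefix each."""
--     parts = []
--     depth = 0
--     buf = []
--     for ch in sel_str:
--         if ch in '([':
--             depth += 1
--             buf.append(ch)
--         elif ch in ')]':
--             depth -= 1
--             buf.append(ch)
--         elif ch == ',' and depth == 0:
--             parts.append(''.join(buf).strip())
--             buf = []
--         else:
--             buf.append(ch)
--     if buf:
--         parts.append(''.join(buf).strip())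
--     return ', '.join(f'{prefix} {p}' for p in parts if p)
-- ===== SOURCE B (Python) =====
-- def prefix_selector_list(sel_str, prefix):
--     """Split a selector list by commas (at top level only) and prefix each."""
--     cuts = []
--     depth = 0
--     for i, ch in enumerate(sel_str):
--         if ch in '([':
--             depth += 1
--         elif ch in ')]':
--             depth -= 1
--         elif ch == ',' and depth == 0:
--             cuts.append(i)
--     pieces = [sel_str[a + 1:b] for a, b in zip([-1] + cuts, cuts + [len(sel_str)])]
--     parts = [p.strip() for p in pieces]
--     return ', '.join(prefix + ' ' + p for p in parts if p)
-- ===== Notes on version B (the rewrite author's own statement) =====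
-- stated objective: alternative
-- what changed: A accumulates characters in a buffer flushed at each top-level comma; B first records the indices of all top-level commas in one pass and then builds the pieces by slicing the string between consecutive cut positions, stripping and joining afterwards.
import Mathlib
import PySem

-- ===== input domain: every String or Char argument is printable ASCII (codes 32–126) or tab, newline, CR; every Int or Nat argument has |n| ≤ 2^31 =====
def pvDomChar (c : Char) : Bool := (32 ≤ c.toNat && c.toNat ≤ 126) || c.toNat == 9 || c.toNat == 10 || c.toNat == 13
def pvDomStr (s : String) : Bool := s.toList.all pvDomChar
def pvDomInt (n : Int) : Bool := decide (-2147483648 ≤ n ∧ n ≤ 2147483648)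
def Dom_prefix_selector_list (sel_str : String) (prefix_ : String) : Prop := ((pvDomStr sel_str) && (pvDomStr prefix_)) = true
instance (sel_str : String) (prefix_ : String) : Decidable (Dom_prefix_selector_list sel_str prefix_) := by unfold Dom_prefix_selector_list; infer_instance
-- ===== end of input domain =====

-- B replaces A's character-accumulator buffer by a first pass recording top-level comma
-- positions and a second pass slicing the string between them (alternative decomposition).


-- ===== PORT A =====
-- loop body of A's for-loop; state = (parts, depth, buf)
def pslStepA (st : List String × Int × List Char) (ch : Char) : List String × Int × List Char :=
  if ch = '(' ∨ ch = '[' then (st.1, st.2.1 + 1, st.2.2 ++ [ch])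
  else if ch = ')' ∨ ch = ']' then (st.1, st.2.1 - 1, st.2.2 ++ [ch])
  else if ch = ',' ∧ st.2.1 = 0 then (st.1 ++ [String.ofList (PySem.Chars.strip st.2.2)], st.2.1, [])
  else (st.1, st.2.1, st.2.2 ++ [ch])

def prefix_selector_list (sel_str : String) (prefix_ : String) : String :=
  let st := sel_str.toList.foldl pslStepA ([], 0, [])
  let parts := if st.2.2 ≠ [] then st.1 ++ [String.ofList (PySem.Chars.strip st.2.2)] else st.1
  PySem.Str.join ", " ((parts.filter (fun p => p ≠ "")).map (fun p => prefix_ ++ " " ++ p))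

-- ===== PORT B =====
-- loop body of B's first pass; state = (cuts, depth), input = (index, char) from enumerate
def pslStepB (st : List Int × Int) (p : Int × Char) : List Int × Int :=
  if p.2 = '(' ∨ p.2 = '[' then (st.1, st.2 + 1)
  else if p.2 = ')' ∨ p.2 = ']' then (st.1, st.2 - 1)
  else if p.2 = ',' ∧ st.2 = 0 then (st.1 ++ [p.1], st.2)
  else st

def prefix_selector_list_alt (sel_str : String) (prefix_ : String) : String :=
  let cs := sel_str.toList
  let st := (PySem.List.enumerate cs).foldl pslStepB ([], 0)
  let cuts := st.1
  let pieces := (((-1) :: cuts).zip (cuts ++ [(cs.length : Int)])).map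
      (fun ab => PySem.List.slice cs (some (ab.1 + 1)) (some ab.2))
  let parts := pieces.map (fun p => String.ofList (PySem.Chars.strip p))
  PySem.Str.join ", " ((parts.filter (fun p => p ≠ "")).map (fun p => prefix_ ++ " " ++ p))

-- ===== PRECONDITION & SPEC =====
def Spec_prefix_selector_list (sel_str : String) (prefix_ : String) (out : String) : Prop := out = prefix_selector_list_alt sel_str prefix_
instance (sel_str : String) (prefix_ : String) (out : String) : Decidable (Spec_prefix_selector_list sel_str prefix_ out) := by unfold Spec_prefix_selector_list; infer_instance

-- ===== CLAIM (what is proved, stated in full; the proofs are below) =====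
def Claim_equal_prefix_selector_list : Prop := ∀ (sel_str : String) (prefix_ : String), Dom_prefix_selector_list sel_str prefix_ → Spec_prefix_selector_list sel_str prefix_ (prefix_selector_list sel_str prefix_)

-- ===== LEMMAS AND PROOFS =====

-- the stripped string of a raw character segment
def pslStripS (buf : List Char) : String := String.ofList (PySem.Chars.strip buf)

-- the raw top-level segments of cs, starting at depth `depth` with accumulated buffer `buf`
def pslSegs : List Char → Int → List Char → List (List Char)
  | [], _, buf => [buf]
  | ch :: rest, depth, buf =>
    if ch = '(' ∨ ch = '[' then pslSegs rest (depth + 1) (buf ++ [ch])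
    else if ch = ')' ∨ ch = ']' then pslSegs rest (depth - 1) (buf ++ [ch])
    else if ch = ',' ∧ depth = 0 then buf :: pslSegs rest depth []
    else pslSegs rest depth (buf ++ [ch])

-- the top-level comma positions of cs, indices starting at s, starting depth d
def pslCuts : List Char → Int → Int → List Int
  | [], _, _ => []
  | ch :: rest, s, d =>
    if ch = '(' ∨ ch = '[' then pslCuts rest (s + 1) (d + 1)
    else if ch = ')' ∨ ch = ']' then pslCuts rest (s + 1) (d - 1)
    else if ch = ',' ∧ d = 0 then s :: pslCuts rest (s + 1) d
    else pslCuts rest (s + 1) d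

-- the pieces cut out of cs by consecutive boundary pairs (a, b) ↦ cs[a+1 : b]
def pslChunks (cs : List Char) : List Int → List (List Char)
  | a :: b :: t => PySem.List.slice cs (some (a + 1)) (some b) :: pslChunks cs (b :: t)
  | _ => []

theorem pslSegs_ne_nil : ∀ (cs : List Char) (d : Int) (buf : List Char), pslSegs cs d buf ≠ [] := by
  intro cs
  induction cs with
  | nil => intro d buf; simp [pslSegs]
  | cons ch rest ih =>
    intro d buf
    simp only [pslSegs]
    split_ifs <;> simp [ih]

theorem pslSegs_buf : ∀ (cs : List Char) (d : Int) (buf : List Char),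
    pslSegs cs d buf = (pslSegs cs d []).modifyHead (fun x => buf ++ x) := by
  intro cs
  induction cs with
  | nil => intro d buf; simp [pslSegs]
  | cons ch rest ih =>
    intro d buf
    simp only [pslSegs]
    split_ifs with h1 h2 h3
    · rw [ih _ (buf ++ [ch]), ih _ ([] ++ [ch]), List.modifyHead_modifyHead]
      apply congrFun
      apply congrArg
      funext x
      simp [List.append_assoc]
    · rw [ih _ (buf ++ [ch]), ih _ ([] ++ [ch]), List.modifyHead_modifyHead]
      apply congrFun
      apply congrArg
      funext x
      simp [List.append_assoc]
    · simp
    · rw [ih _ (buf ++ [ch]), ih _ ([] ++ [ch]), List.modifyHead_modifyHead]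
      apply congrFun
      apply congrArg
      funext x
      simp [List.append_assoc]

theorem pslDropLast_append_getLastD : ∀ (l : List (List Char)), l ≠ [] → l.dropLast ++ [l.getLastD []] = l := by
  intro l
  induction l with
  | nil => intro h; simp at h
  | cons a t ih =>
    intro _
    cases t with
    | nil => simp
    | cons b t' => simpa using ih (by simp)

theorem pslFoldA_eq : ∀ (cs : List Char) (parts : List String) (d : Int) (buf : List Char), ∃ d',
    cs.foldl pslStepA (parts, d, buf) =
      (parts ++ ((pslSegs cs d buf).dropLast).map pslStripS, d', (pslSegs cs d buf).getLastD []) := by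
  intro cs
  induction cs with
  | nil => intro parts d buf; exact ⟨d, by simp [pslSegs]⟩
  | cons ch rest ih =>
    intro parts d buf
    simp only [List.foldl_cons, pslStepA, pslSegs]
    split_ifs with h1 h2 h3
    · exact ih parts (d + 1) (buf ++ [ch])
    · exact ih parts (d - 1) (buf ++ [ch])
    · obtain ⟨d', hd⟩ := ih (parts ++ [String.ofList (PySem.Chars.strip buf)]) d []
      refine ⟨d', ?_⟩
      rw [hd]
      have hne := pslSegs_ne_nil rest d []
      rw [List.dropLast_cons_of_ne_nil hne]
      cases hL : pslSegs rest d [] with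
      | nil => exact absurd hL hne
      | cons x xs => simp [pslStripS]
    · exact ih parts d (buf ++ [ch])

theorem pslFoldB_eq : ∀ (cs : List Char) (s : Int) (acc : List Int) (d : Int), ∃ d',
    (PySem.List.enumerate cs s).foldl pslStepB (acc, d) = (acc ++ pslCuts cs s d, d') := by
  intro cs
  induction cs with
  | nil => intro s acc d; exact ⟨d, by simp [PySem.List.enumerate_nil, pslCuts]⟩
  | cons ch rest ih =>
    intro s acc d
    rw [PySem.List.enumerate_cons]
    simp only [List.foldl_cons, pslStepB, pslCuts]
    split_ifs with h1 h2 h3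
    · exact ih (s + 1) acc (d + 1)
    · exact ih (s + 1) acc (d - 1)
    · obtain ⟨d', hd⟩ := ih (s + 1) (acc ++ [s]) d
      exact ⟨d', by rw [hd]; simp⟩
    · exact ih (s + 1) acc d

theorem pslCuts_shift : ∀ (cs : List Char) (s d : Int), pslCuts cs (s + 1) d = (pslCuts cs s d).map (· + 1) := by
  intro cs
  induction cs with
  | nil => intro s d; simp [pslCuts]
  | cons ch rest ih =>
    intro s d
    simp only [pslCuts]
    split_ifs <;> simp [ih]

theorem pslCuts_nonneg : ∀ (cs : List Char) (s d : Int), 0 ≤ s → ∀ x ∈ pslCuts cs s d, 0 ≤ x := by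
  intro cs
  induction cs with
  | nil => intro s d _ x hx; simp [pslCuts] at hx
  | cons ch rest ih =>
    intro s d hs x hx
    simp only [pslCuts] at hx
    split_ifs at hx with h1 h2 h3
    · exact ih (s + 1) (d + 1) (by omega) x hx
    · exact ih (s + 1) (d - 1) (by omega) x hx
    · rcases List.mem_cons.mp hx with h | h
      · omega
      · exact ih (s + 1) d (by omega) x h
    · exact ih (s + 1) d (by omega) x hx

theorem pslZip_map_eq_chunks : ∀ (cs : List Char) (a : Int) (L : List Int) (n : Int),
    ((a :: L).zip (L ++ [n])).map (fun ab => PySem.List.slice cs (some (ab.1 + 1)) (some ab.2))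
      = pslChunks cs (a :: (L ++ [n])) := by
  intro cs a L
  induction L generalizing a with
  | nil => intro n; simp [pslChunks]
  | cons b t ih =>
    intro n
    simp only [List.cons_append, List.zip_cons_cons, List.map_cons, pslChunks]
    rw [ih b n]

theorem pslSlice_shift : ∀ (ch : Char) (cs : List Char) (a b : Int), -1 ≤ a → 0 ≤ b →
    PySem.List.slice (ch :: cs) (some (a + 2)) (some (b + 1)) = PySem.List.slice cs (some (a + 1)) (some b) := by
  intro ch cs a b ha hb
  rw [PySem.List.slice_toNat _ (by omega) (by omega), PySem.List.slice_toNat _ (by omega) (by omega)]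
  have h1 : (a + 2).toNat = (a + 1).toNat + 1 := by omega
  rw [h1, List.drop_succ_cons]
  congr 1
  omega

theorem pslSlice_cons : ∀ (ch : Char) (cs : List Char) (b : Int), 0 ≤ b →
    PySem.List.slice (ch :: cs) (some 0) (some (b + 1)) = ch :: PySem.List.slice cs (some 0) (some b) := by
  intro ch cs b hb
  rw [PySem.List.slice_toNat _ (by omega) (by omega), PySem.List.slice_toNat _ (by omega) (by omega)]
  have h1 : (b + 1).toNat = b.toNat + 1 := by omega
  simp [h1]

theorem pslChunks_shift : ∀ (ch : Char) (cs : List Char) (a : Int) (t : List Int), -1 ≤ a → (∀ x ∈ t, 0 ≤ x) →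
    pslChunks (ch :: cs) ((a :: t).map (· + 1)) = pslChunks cs (a :: t) := by
  intro ch cs a t
  induction t generalizing a with
  | nil => intro _ _; simp [pslChunks]
  | cons b t' ih =>
    intro ha ht
    have hb : 0 ≤ b := ht b (by simp)
    simp only [List.map_cons, pslChunks]
    have : a + 1 + 1 = a + 2 := by ring
    rw [this, pslSlice_shift ch cs a b ha hb]
    have := ih b (by omega) (fun x hx => ht x (by simp [hx]))
    simpa using this

theorem pslChunks_cons : ∀ (ch : Char) (cs : List Char) (L : List Int), (∀ x ∈ L, 0 ≤ x) →
    pslChunks (ch :: cs) ((-1) :: L.map (· + 1)) = (pslChunks cs ((-1) :: L)).modifyHead (fun x => ch :: x) := by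
  intro ch cs L hL
  cases L with
  | nil => simp [pslChunks]
  | cons b t =>
    have hb : 0 ≤ b := hL b (by simp)
    simp only [List.map_cons, pslChunks, List.modifyHead_cons]
    congr 1
    · rw [show (-1 : Int) + 1 = 0 by ring, pslSlice_cons ch cs b hb]
    · have := pslChunks_shift ch cs b t (by omega) (fun x hx => hL x (by simp [hx]))
      simpa using this

theorem pslChunks_drop : ∀ (ch : Char) (cs : List Char) (L : List Int), (∀ x ∈ L, 0 ≤ x) →
    pslChunks (ch :: cs) (0 :: L.map (· + 1)) = pslChunks cs ((-1) :: L) := by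
  intro ch cs L hL
  cases L with
  | nil => simp [pslChunks]
  | cons b t =>
    have hb : 0 ≤ b := hL b (by simp)
    simp only [List.map_cons, pslChunks]
    congr 1
    · rw [show (0 : Int) + 1 = -1 + 2 by ring, pslSlice_shift ch cs (-1) b (by omega) hb]
    · have := pslChunks_shift ch cs b t (by omega) (fun x hx => hL x (by simp [hx]))
      simpa using this

theorem pslPieces_eq : ∀ (cs : List Char) (d : Int),
    pslChunks cs ((-1) :: (pslCuts cs 0 d ++ [(cs.length : Int)])) = pslSegs cs d [] := by
  intro cs
  induction cs with
  | nil =>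
    intro d
    simp [pslCuts, pslChunks, pslSegs, PySem.List.slice_toNat]
  | cons ch rest ih =>
    intro d
    have hlen : (((ch :: rest).length : Nat) : Int) = (rest.length : Int) + 1 := by
      push_cast [List.length_cons]
      ring
    have hnn : ∀ (dd : Int), ∀ x ∈ pslCuts rest 0 dd ++ [(rest.length : Int)], (0:Int) ≤ x := by
      intro dd x hx
      rcases List.mem_append.mp hx with h | h
      · exact pslCuts_nonneg rest 0 dd le_rfl x h
      · simp at h; omega
    have hm : ∀ (dd : Int), (pslCuts rest 0 dd).map (· + 1) ++ [(rest.length : Int) + 1]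
        = ((pslCuts rest 0 dd) ++ [(rest.length : Int)]).map (· + 1) := by
      intro dd; simp
    simp only [pslCuts, pslSegs]
    split_ifs with h1 h2 h3
    · rw [pslCuts_shift rest 0 (d + 1), hlen, hm, pslChunks_cons ch rest _ (hnn (d + 1)), ih (d + 1),
        pslSegs_buf rest (d + 1) ([] ++ [ch])]
      simp
    · rw [pslCuts_shift rest 0 (d - 1), hlen, hm, pslChunks_cons ch rest _ (hnn (d - 1)), ih (d - 1),
        pslSegs_buf rest (d - 1) ([] ++ [ch])]
      simp
    · rw [pslCuts_shift rest 0 d, hlen]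
      simp only [List.cons_append]
      rw [hm]
      simp only [pslChunks]
      congr 1
      rw [pslChunks_drop ch rest _ (hnn d), ih d]
    · rw [pslCuts_shift rest 0 d, hlen, hm, pslChunks_cons ch rest _ (hnn d), ih d,
        pslSegs_buf rest d ([] ++ [ch])]
      simp

-- ===== VERDICT (by name: the statement is the Claim_ definition above) =====
theorem pslFilter_eq (L : List (List Char)) (hL : L ≠ []) :
    ((if L.getLastD [] ≠ [] then (L.dropLast).map pslStripS ++ [pslStripS (L.getLastD [])]
      else (L.dropLast).map pslStripS).filter (fun p => p ≠ ""))
      = (L.map pslStripS).filter (fun p => p ≠ "") := by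
  conv_rhs => rw [← pslDropLast_append_getLastD L hL]
  rw [List.map_append, List.filter_append, List.map_singleton]
  by_cases hb : L.getLastD [] = []
  · rw [if_neg (not_not_intro hb), hb]
    have hs : pslStripS [] = "" := by
      simp [pslStripS, PySem.Chars.strip, PySem.Chars.lstrip, PySem.Chars.rstrip]
    rw [hs]
    simp
  · rw [if_pos hb, List.filter_append]

theorem prefix_selector_list_spec : Claim_equal_prefix_selector_list := by
  intro sel_str prefix_ _
  unfold Spec_prefix_selector_list prefix_selector_list prefix_selector_list_alt
  obtain ⟨d1, h1⟩ := pslFoldA_eq sel_str.toList [] 0 []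
  obtain ⟨d2, h2⟩ := pslFoldB_eq sel_str.toList 0 [] 0
  simp only [h1, h2, List.nil_append]
  rw [pslZip_map_eq_chunks sel_str.toList (-1) (pslCuts sel_str.toList 0 0) ((sel_str.toList.length : Nat) : Int),
    pslPieces_eq sel_str.toList 0]
  have := pslFilter_eq (pslSegs sel_str.toList 0 []) (pslSegs_ne_nil sel_str.toList 0 [])
  simp only [pslStripS] at this
  rw [this]
  rfl
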